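-- pv_equiv track=rewrite | github.com/S-Huzaifa-Ali/DAA-Project | Part-One/QuestionH-2.py | count_significant_inversions_naive
-- ===== SOURCE A (Python) =====
-- def count_significant_inversions_naive(arr):
--     """
--     Naive O(n²) algorithm to count significant inversions.
--     Used for verification.
--
--     Args:
--         arr: list of distinct numbers
--
--     Returns:
--         int: count of significant inversions
--     """
--     count = 0
--     n = len(arr)
--
--     for i in range(n):
--         for j in range(i + 1, n):
--             if arr[i] > 2 * arr[j]:
--                 count += 1
--
--     return count
-- ===== SOURCE B (Python) =====
-- def count_significant_inversions_naive(arr):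
--     """Divide-and-conquer count of pairs i<j with arr[i] > 2*arr[j]:
--     split in half, count within each half recursively, then count
--     cross pairs with one two-pointer sweep over the sorted halves."""
--     def solve(a):
--         n = len(a)
--         if n <= 1:
--             return 0
--         mid = n // 2
--         left, right = a[:mid], a[mid:]
--         total = solve(left) + solve(right)
--         left_s, right_s = sorted(left), sorted(right)
--         i = 0
--         for y in right_s:
--             while i < len(left_s) and left_s[i] <= 2 * y:
--                 i += 1
--             total += len(left_s) - i
--         return total
--     return solve(arr)
-- ===== Notes on version B (the rewrite author's own statement) =====
-- stated objective: faster
-- what changed: Replaced the O(n^2) double index loop with divide-and-conquer: count each half recursively, sort the halves, and count cross pairs arr[i] > 2*arr[j] with a single two-pointer sweep.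
import Mathlib
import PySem

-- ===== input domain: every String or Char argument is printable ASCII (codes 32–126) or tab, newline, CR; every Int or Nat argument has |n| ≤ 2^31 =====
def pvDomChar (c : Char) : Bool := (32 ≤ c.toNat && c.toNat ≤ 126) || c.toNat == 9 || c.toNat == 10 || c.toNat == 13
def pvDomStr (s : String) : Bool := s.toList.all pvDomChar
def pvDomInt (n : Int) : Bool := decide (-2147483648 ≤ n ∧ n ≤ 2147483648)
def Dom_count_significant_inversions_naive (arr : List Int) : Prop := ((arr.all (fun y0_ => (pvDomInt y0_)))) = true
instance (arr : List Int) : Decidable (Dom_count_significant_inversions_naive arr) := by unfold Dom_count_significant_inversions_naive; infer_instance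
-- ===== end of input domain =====

-- B replaces A's O(n^2) double loop by divide-and-conquer with a two-pointer cross count over sorted halves (measurably faster on large inputs).

-- ===== PORT A =====
-- literal port of A's nested index loops
def count_significant_inversions_naive (arr : List Int) : Int :=
  (PySem.List.pyRange 0 (arr.length : Int) 1).foldl
    (fun count i =>
      (PySem.List.pyRange (i + 1) (arr.length : Int) 1).foldl
        (fun count j =>
          if PySem.List.pyGetD arr i 0 > 2 * PySem.List.pyGetD arr j 0 then count + 1 else count)
        count)
    0

-- ===== PORT B =====
-- the two-pointer sweep: for each y of the sorted right half, advance past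
-- left elements ≤ 2*y, then add the number of remaining left elements
def bCross : List Int → List Int → Int
  | _, [] => 0
  | [], _ :: r => bCross [] r
  | x :: l, y :: r =>
      if x ≤ 2 * y then bCross l (y :: r)
      else ((x :: l).length : Int) + bCross (x :: l) r
termination_by l r => l.length + r.length

def bSolve : List Int → Int
  | [] => 0
  | [_] => 0
  | x :: y :: rest =>
      let a := x :: y :: rest
      let mid := a.length / 2
      let left := a.take mid
      let right := a.drop mid
      bSolve left + bSolve right +
        bCross (PySem.List.sorted left (fun v => v) false)
               (PySem.List.sorted right (fun v => v) false)
termination_by a => a.length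
decreasing_by
  · simp [List.length_take]; omega
  · simp [List.length_drop]; omega

def count_significant_inversions_naive_alt (arr : List Int) : Int := bSolve arr

-- ===== PRECONDITION & SPEC =====
def Spec_count_significant_inversions_naive (arr : List Int) (out : Int) : Prop := out = count_significant_inversions_naive_alt arr
instance (arr : List Int) (out : Int) : Decidable (Spec_count_significant_inversions_naive arr out) := by unfold Spec_count_significant_inversions_naive; infer_instance

-- ===== CLAIM (what is proved, stated in full; the proofs are below) =====
def Claim_equal_count_significant_inversions_naive : Prop := ∀ (arr : List Int), Dom_count_significant_inversions_naive arr → Spec_count_significant_inversions_naive arr (count_significant_inversions_naive arr)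

-- ===== LEMMAS AND PROOFS =====

/-- Reference count: pairs i < j with arr[i] > 2*arr[j], by structural recursion. -/
def nCount : List Int → Int
  | [] => 0
  | x :: t => (t.countP (fun y => decide (2 * y < x)) : Int) + nCount t

/-- Cross count, per right element. -/
def crossN (l r : List Int) : Int :=
  (r.map (fun y => ((l.countP (fun x => decide (2 * y < x)) : Nat) : Int))).sum

lemma nCount_append (l r : List Int) :
    nCount (l ++ r) = nCount l + nCount r + crossN l r := by
  induction l with
  | nil => simp [nCount, crossN]
  | cons x l ih =>
      simp only [List.cons_append, nCount, ih, List.countP_append, crossN,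
        List.countP_cons]
      push_cast
      rw [PySem.List.sum_map_add_int]
      rw [PySem.List.sum_map_ite_one_zero (fun y => decide (2 * y < x)) r]
      ring

lemma crossN_perm {l l' r r' : List Int} (hl : l.Perm l') (hr : r.Perm r') :
    crossN l r = crossN l' r' := by
  unfold crossN
  have hfun : ∀ y : Int,
      ((l.countP (fun x => decide (2 * y < x)) : Nat) : Int)
        = ((l'.countP (fun x => decide (2 * y < x)) : Nat) : Int) := by
    intro y; exact congrArg (Nat.cast : Nat → Int) (hl.countP_eq _)
  calc (r.map (fun y => ((l.countP (fun x => decide (2 * y < x)) : Nat) : Int))).sum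
      = (r.map (fun y => ((l'.countP (fun x => decide (2 * y < x)) : Nat) : Int))).sum := by
        rw [List.map_congr_left (fun y _ => hfun y)]
    _ = _ := (hr.map _).sum_eq

lemma crossN_nil_left (r : List Int) : crossN [] r = 0 := by
  simp [crossN]

lemma bCross_eq (l r : List Int)
    (hl : l.Pairwise (· ≤ ·)) (hr : r.Pairwise (· ≤ ·)) :
    bCross l r = crossN l r := by
  induction l, r using bCross.induct with
  | case1 l => simp [bCross, crossN]
  | case2 y r ih =>
      rw [bCross, ih List.Pairwise.nil hr.tail, crossN_nil_left, crossN_nil_left]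
  | case3 x l y r hle ih =>
      rw [bCross, if_pos hle, ih hl.tail hr]
      unfold crossN
      congr 1
      apply List.map_congr_left
      intro y' hy'
      congr 1
      rw [List.countP_cons]
      have hyy' : y ≤ y' := by
        rcases List.mem_cons.mp hy' with h | h
        · omega
        · exact (List.pairwise_cons.mp hr).1 y' h
      have : ¬ (2 * y' < x) := by omega
      simp [this]
  | case4 x l y r hgt ih =>
      rw [bCross, if_neg hgt, ih hl hr.tail]
      have hall : List.countP (fun x' => decide (2 * y < x')) (x :: l) = (x :: l).length := by
        rw [List.countP_eq_length]
        intro x' hx'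
        have hxx' : x ≤ x' := by
          rcases List.mem_cons.mp hx' with h | h
          · omega
          · exact (List.pairwise_cons.mp hl).1 x' h
        simp; omega
      show _ = crossN (x :: l) (y :: r)
      unfold crossN
      rw [List.map_cons, List.sum_cons, hall]

lemma bSolve_eq (xs : List Int) : bSolve xs = nCount xs := by
  induction xs using bSolve.induct with
  | case1 => simp [bSolve, nCount]
  | case2 x => simp [bSolve, nCount]
  | case3 x y rest a mid left right ih1 ih2 =>
      rw [bSolve, ih1, ih2]
      rw [bCross_eq _ _
        (by simpa using PySem.List.sorted_pairwise (a.take mid) (fun v => v))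
        (by simpa using PySem.List.sorted_pairwise (a.drop mid) (fun v => v))]
      rw [crossN_perm (PySem.List.sorted_perm (a.take mid) (fun v => v) false)
        (PySem.List.sorted_perm (a.drop mid) (fun v => v) false)]
      have : nCount (x :: y :: rest) = nCount (a.take mid ++ a.drop mid) := by
        rw [List.take_append_drop]
      rw [this, nCount_append]

lemma inner_loop (arr : List Int) (x : Int) (k : Nat) (c : Int) :
    (PySem.List.pyRange ((k : Nat) : Int) (arr.length : Int) 1).foldl
      (fun count j => if x > 2 * PySem.List.pyGetD arr j 0 then count + 1 else count) c
    = c + ((arr.drop k).countP (fun y => decide (2 * y < x)) : Int) := by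
  rw [PySem.List.foldl_pyRange_pyGetD' arr 0
    (fun count y => if x > 2 * y then count + 1 else count) c (by positivity)]
  rw [Int.toNat_natCast]
  have h := PySem.List.foldl_count_if (fun y => decide (2 * y < x)) (arr.drop k) c
  simp only [decide_eq_true_eq] at h
  exact h

lemma outer_loop (arr : List Int) : ∀ (d k : Nat), arr.length - k = d → ∀ (c : Int),
    (PySem.List.pyRange ((k : Nat) : Int) (arr.length : Int) 1).foldl
      (fun count i =>
        (PySem.List.pyRange (i + 1) (arr.length : Int) 1).foldl
          (fun count j =>
            if PySem.List.pyGetD arr i 0 > 2 * PySem.List.pyGetD arr j 0 then count + 1 else count)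
          count) c
    = c + nCount (arr.drop k) := by
  intro d
  induction d with
  | zero =>
      intro k hk c
      rw [PySem.List.pyRange_one_eq_nil (by exact_mod_cast Nat.le_of_sub_eq_zero hk)]
      rw [List.drop_eq_nil_of_le (by omega)]
      simp [nCount]
  | succ d ih =>
      intro k hk c
      have hklt : k < arr.length := by omega
      rw [PySem.List.pyRange_one_cons (by exact_mod_cast hklt)]
      rw [List.foldl_cons]
      have hx : PySem.List.pyGetD arr ((k : Nat) : Int) 0 = arr[k] := by
        rw [PySem.List.pyGetD_natCast, List.getD_eq_getElem arr 0 hklt]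
      have hcast : ((k : Nat) : Int) + 1 = (((k + 1 : Nat)) : Int) := by push_cast; ring
      rw [hx, hcast, inner_loop arr (arr[k]) (k + 1) c]
      rw [ih (k + 1) (by omega)]
      rw [List.drop_eq_getElem_cons hklt, nCount]
      ring

-- ===== VERDICT (by name: the statement is the Claim_ definition above) =====
theorem count_significant_inversions_naive_spec : Claim_equal_count_significant_inversions_naive := by
  intro arr _
  unfold Spec_count_significant_inversions_naive count_significant_inversions_naive
    count_significant_inversions_naive_alt
  rw [bSolve_eq]
  have := outer_loop arr arr.length 0 (by omega) 0
  simpa using this
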